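-- pv_equiv track=rewrite | github.com/Aveek-Saha/Movie-Script-Database | parse_files.py | find_arrange
-- ===== SOURCE A (Python) =====
-- def find_arrange(tag_valid):
--     c_ind = [i for i, x in enumerate(tag_valid) if x == 'C']
--     c_segs = []
--     arrange_ind = []
--     invalid_set = [['C', 'E', 'D'], ['C', 'D', 'E', 'D']]
--     if len(c_ind) > 0:
--         # BREAK UP INTO C-* BLOCKS
--         if c_ind[0] != 0:
--             c_segs.append(tag_valid[: c_ind[0]])
--
--         for i in range((len(c_ind) - 1)):
--             c_segs.append(tag_valid[c_ind[i]: c_ind[i + 1]])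
--
--         c_segs.append(tag_valid[c_ind[-1]:])
--         # RE-ARRANGE IN BLOCKS IF REQUIRED
--         for i in range(len(c_segs)):
--             inv_flag = 0
--             if len(c_segs[i]) > 2:
--                 if any([c_segs[i][j: (j + len(invalid_set[0]))] == invalid_set[0]
--                         for j in range(len(c_segs[i]) - len(invalid_set[0]) + 1)]):
--                     inv_flag = 1
--
--             if inv_flag == 0 and len(c_segs[i]) > 3:
--                 if any([c_segs[i][j: (j + len(invalid_set[1]))] == invalid_set[1]
--                         for j in range(len(c_segs[i]) - len(invalid_set[1]) + 1)]):
--                     inv_flag = 1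
--
--             if inv_flag == 1:
--                 arrange_ind.append(i)
--
--     return c_segs, arrange_ind
-- ===== SOURCE B (Python) =====
-- def find_arrange(tag_valid):
--     # Single left-to-right pass: split at each 'C' while walking the list,
--     # then flag a segment by a direct prefix test (a segment can contain 'C'
--     # only at position 0, so the invalid patterns can only match there).
--     if 'C' not in tag_valid:
--         return [], []
--     segs = []
--     cur = []
--     for x in tag_valid:
--         if x == 'C':
--             if cur:
--                 segs.append(cur)
--             cur = [x]
--         else:
--             cur.append(x)
--     segs.append(cur)
--     arrange_ind = [i for i, s in enumerate(segs)
--                    if s[:3] == ['C', 'E', 'D'] or s[:4] == ['C', 'D', 'E', 'D']]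
--     return segs, arrange_ind
-- ===== Notes on version B (the rewrite author's own statement) =====
-- stated objective: simpler
-- what changed: B replaces A's two-phase construction (collect all 'C' indices, then slice between consecutive index pairs, then scan every window of each segment for the invalid patterns) by a single left-to-right fold that splits at each 'C', and flags a segment with a direct prefix comparison (a segment can contain 'C' only at position 0, so the patterns can only match there), removing the index arithmetic and the inner window loops.
import Mathlib
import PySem

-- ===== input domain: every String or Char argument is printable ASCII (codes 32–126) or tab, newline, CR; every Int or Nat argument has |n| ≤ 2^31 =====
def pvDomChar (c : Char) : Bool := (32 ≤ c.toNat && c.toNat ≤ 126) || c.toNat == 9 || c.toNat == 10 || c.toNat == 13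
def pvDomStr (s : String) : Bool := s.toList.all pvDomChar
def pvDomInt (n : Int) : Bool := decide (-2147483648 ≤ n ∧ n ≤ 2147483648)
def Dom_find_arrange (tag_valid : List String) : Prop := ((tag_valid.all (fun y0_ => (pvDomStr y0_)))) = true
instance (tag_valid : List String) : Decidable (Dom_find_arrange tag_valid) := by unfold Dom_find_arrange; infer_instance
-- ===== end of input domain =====

-- B replaces A's index-arithmetic segmentation and windowed pattern scans by a single
-- left-to-right splitting pass with a direct prefix test per segment (objective: simpler).

-- ===== PORT A =====
def find_arrange (tag_valid : List String) : List (List String) × List Int :=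
  let c_ind : List Int := ((PySem.List.enumerate tag_valid).filter (fun p => p.2 == "C")).map (fun p => p.1)
  let c_segs : List (List String) := []
  let arrange_ind : List Int := []
  let invalid_set : List (List String) := [["C", "E", "D"], ["C", "D", "E", "D"]]
  if c_ind.length > 0 then
    -- BREAK UP INTO C-* BLOCKS
    let c_segs := if PySem.List.pyGetD c_ind 0 0 ≠ 0 then
        c_segs ++ [PySem.List.slice tag_valid none (some (PySem.List.pyGetD c_ind 0 0))]
      else c_segs
    let c_segs := (PySem.List.pyRange 0 (PySem.List.len c_ind - 1)).foldl
        (fun segs i => segs ++ [PySem.List.slice tag_valid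
            (some (PySem.List.pyGetD c_ind i 0)) (some (PySem.List.pyGetD c_ind (i + 1) 0))]) c_segs
    let c_segs := c_segs ++ [PySem.List.slice tag_valid (some (PySem.List.pyGetD c_ind (-1) 0)) none]
    -- RE-ARRANGE IN BLOCKS IF REQUIRED
    let arrange_ind := (PySem.List.pyRange 0 (PySem.List.len c_segs)).foldl
      (fun acc i =>
        let seg := PySem.List.pyGetD c_segs i []
        let inv_flag : Int := 0
        let inv_flag := if PySem.List.len seg > 2 then
            (if ((PySem.List.pyRange 0 (PySem.List.len seg - PySem.List.len (PySem.List.pyGetD invalid_set 0 []) + 1)).map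
                  (fun j => PySem.List.slice seg (some j) (some (j + PySem.List.len (PySem.List.pyGetD invalid_set 0 []))) ==
                            PySem.List.pyGetD invalid_set 0 [])).any id then 1 else inv_flag)
          else inv_flag
        let inv_flag := if inv_flag = 0 ∧ PySem.List.len seg > 3 then
            (if ((PySem.List.pyRange 0 (PySem.List.len seg - PySem.List.len (PySem.List.pyGetD invalid_set 1 []) + 1)).map
                  (fun j => PySem.List.slice seg (some j) (some (j + PySem.List.len (PySem.List.pyGetD invalid_set 1 []))) ==
                            PySem.List.pyGetD invalid_set 1 [])).any id then 1 else inv_flag)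
          else inv_flag
        if inv_flag = 1 then acc ++ [i] else acc) arrange_ind
    (c_segs, arrange_ind)
  else (c_segs, arrange_ind)

-- ===== PORT B =====
def find_arrange_alt (tag_valid : List String) : List (List String) × List Int :=
  if "C" ∈ tag_valid then
    let st := tag_valid.foldl
      (fun (st : List (List String) × List String) x =>
        if x == "C" then
          (if st.2.isEmpty then (st.1, [x]) else (st.1 ++ [st.2], [x]))
        else (st.1, st.2 ++ [x])) ([], [])
    let segs := st.1 ++ [st.2]
    let arrange_ind := (PySem.List.enumerate segs).filterMap
      (fun p => if p.2.take 3 == ["C", "E", "D"] || p.2.take 4 == ["C", "D", "E", "D"] then some p.1 else none)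
    (segs, arrange_ind)
  else ([], [])

-- ===== PRECONDITION & SPEC =====
def Spec_find_arrange (tag_valid : List String) (out : List (List String) × List Int) : Prop := out = find_arrange_alt tag_valid
instance (tag_valid : List String) (out : List (List String) × List Int) : Decidable (Spec_find_arrange tag_valid out) := by unfold Spec_find_arrange; infer_instance

-- ===== CLAIM (what is proved, stated in full; the proofs are below) =====
def Claim_equal_find_arrange : Prop := ∀ (tag_valid : List String), Dom_find_arrange tag_valid → Spec_find_arrange tag_valid (find_arrange tag_valid)

-- ===== LEMMAS AND PROOFS =====

-- canonical segmentation: split at every "C", current segment accumulated in `cur`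
def segS (cur : List String) : List String → List (List String)
  | [] => [cur]
  | x :: xs => if x = "C" then (if cur = [] then segS [x] xs else cur :: segS [x] xs) else segS (cur ++ [x]) xs

-- positions of "C"
def cpos : List String → List Nat
  | [] => []
  | x :: xs => if x = "C" then 0 :: (cpos xs).map (· + 1) else (cpos xs).map (· + 1)

-- A's segment list, as recursion over the C-positions
def bodyA (l : List String) : List Nat → List (List String)
  | [] => []
  | [k] => [l.drop k]
  | k1 :: k2 :: ks => (l.drop k1).take (k2 - k1) :: bodyA l (k2 :: ks)

-- A's c_ind expression
def cindX (l : List String) : List Int :=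
  ((PySem.List.enumerate l).filter (fun p => p.2 == "C")).map (fun p => p.1)

-- A's per-segment flag computation (same term as in the port, as a function of the segment)
def wflag (seg : List String) : Int :=
  let invalid_set : List (List String) := [["C", "E", "D"], ["C", "D", "E", "D"]]
  let inv_flag : Int := 0
  let inv_flag := if PySem.List.len seg > 2 then
      (if ((PySem.List.pyRange 0 (PySem.List.len seg - PySem.List.len (PySem.List.pyGetD invalid_set 0 []) + 1)).map
            (fun j => PySem.List.slice seg (some j) (some (j + PySem.List.len (PySem.List.pyGetD invalid_set 0 []))) ==
                      PySem.List.pyGetD invalid_set 0 [])).any id then 1 else inv_flag)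
    else inv_flag
  let inv_flag := if inv_flag = 0 ∧ PySem.List.len seg > 3 then
      (if ((PySem.List.pyRange 0 (PySem.List.len seg - PySem.List.len (PySem.List.pyGetD invalid_set 1 []) + 1)).map
            (fun j => PySem.List.slice seg (some j) (some (j + PySem.List.len (PySem.List.pyGetD invalid_set 1 []))) ==
                      PySem.List.pyGetD invalid_set 1 [])).any id then 1 else inv_flag)
    else inv_flag
  inv_flag

-- A's two segment-building phases and the arrange loop, as functions
def csegsA (l : List String) (c_ind : List Int) : List (List String) :=
  let c_segs : List (List String) := []
  let c_segs := if PySem.List.pyGetD c_ind 0 0 ≠ 0 then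
      c_segs ++ [PySem.List.slice l none (some (PySem.List.pyGetD c_ind 0 0))]
    else c_segs
  let c_segs := (PySem.List.pyRange 0 (PySem.List.len c_ind - 1)).foldl
      (fun segs i => segs ++ [PySem.List.slice l
          (some (PySem.List.pyGetD c_ind i 0)) (some (PySem.List.pyGetD c_ind (i + 1) 0))]) c_segs
  c_segs ++ [PySem.List.slice l (some (PySem.List.pyGetD c_ind (-1) 0)) none]

def arrangeA (c_segs : List (List String)) : List Int :=
  (PySem.List.pyRange 0 (PySem.List.len c_segs)).foldl
    (fun acc i => if wflag (PySem.List.pyGetD c_segs i []) = 1 then acc ++ [i] else acc) []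

-- B's loop step and prefix test, as functions
def stepB : List (List String) × List String → String → List (List String) × List String :=
  fun st x =>
    if x == "C" then
      (if st.2.isEmpty then (st.1, [x]) else (st.1 ++ [st.2], [x]))
    else (st.1, st.2 ++ [x])

def segsB (l : List String) : List (List String) :=
  (l.foldl stepB ([], [])).1 ++ [(l.foldl stepB ([], [])).2]

def flagB (s : List String) : Bool :=
  s.take 3 == ["C", "E", "D"] || s.take 4 == ["C", "D", "E", "D"]

lemma A_unfold (l : List String) : find_arrange l =
    if (cindX l).length > 0 then (csegsA l (cindX l), arrangeA (csegsA l (cindX l))) else ([], []) := rfl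

lemma B_unfold (l : List String) : find_arrange_alt l =
    if "C" ∈ l then (segsB l, (PySem.List.enumerate (segsB l)).filterMap
      (fun p => if flagB p.2 then some p.1 else none)) else ([], []) := rfl

lemma cpos_eq_nil {b : List String} (h : "C" ∉ b) : cpos b = [] := by
  induction b with
  | nil => rfl
  | cons x xs ih =>
    simp only [List.mem_cons, not_or] at h
    simp [cpos, Ne.symm h.1, ih h.2]

lemma cpos_append {a : List String} (b : List String) (h : "C" ∉ a) :
    cpos (a ++ "C" :: b) = a.length :: (cpos b).map (· + (a.length + 1)) := by
  induction a with
  | nil => simp [cpos]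
  | cons x xs ih =>
    simp only [List.mem_cons, not_or] at h
    have hx : ¬ x = "C" := fun e => h.1 e.symm
    simp only [List.cons_append, cpos, if_neg hx, ih h.2, List.map_cons, List.map_map,
      List.length_cons]
    refine List.cons_eq_cons.mpr ⟨rfl, ?_⟩
    apply List.map_congr_left
    intro k _
    simp only [Function.comp_apply]
    omega

lemma first_split {b : List String} (h : "C" ∈ b) :
    ∃ a b', b = a ++ "C" :: b' ∧ "C" ∉ a := by
  induction b with
  | nil => simp at h
  | cons x xs ih =>
    by_cases hx : x = "C"
    · exact ⟨[], xs, by simp [hx], by simp⟩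
    · rcases ih (by simpa [Ne.symm hx] using h) with ⟨a, b', hb, ha⟩
      exact ⟨x :: a, b', by simp [hb], by simp [Ne.symm hx, ha]⟩

lemma segS_no_C {b : List String} (cur : List String) (h : "C" ∉ b) (hc : cur ≠ []) :
    segS cur b = [cur ++ b] := by
  induction b generalizing cur with
  | nil => simp [segS]
  | cons x xs ih =>
    simp only [List.mem_cons, not_or] at h
    have hx : ¬ x = "C" := fun e => h.1 e.symm
    rw [segS, if_neg hx, ih (cur ++ [x]) h.2 (by simp)]
    simp

lemma segS_split {a : List String} (b cur : List String) (h : "C" ∉ a) :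
    segS cur (a ++ "C" :: b) = (if cur ++ a = [] then [] else [cur ++ a]) ++ segS ["C"] b := by
  induction a generalizing cur with
  | nil =>
    by_cases hc : cur = [] <;> simp [segS, hc]
  | cons x xs ih =>
    simp only [List.mem_cons, not_or] at h
    have hx : ¬ x = "C" := fun e => h.1 e.symm
    rw [List.cons_append, segS, if_neg hx, ih (cur := cur ++ [x]) h.2]
    simp

lemma segS_inv {l cur : List String} (h : "C" ∉ cur.drop 1) :
    ∀ s ∈ segS cur l, "C" ∉ s.drop 1 := by
  induction l generalizing cur with
  | nil => simpa [segS] using h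
  | cons x xs ih =>
    by_cases hx : x = "C"
    · subst hx
      by_cases hc : cur = []
      · simpa [segS, hc] using ih (cur := ["C"]) (by simp)
      · intro s hs
        simp only [segS, if_neg hc] at hs
        rcases List.mem_cons.mp hs with rfl | hs
        · exact h
        · exact ih (cur := ["C"]) (by simp) s hs
    · intro s hs
      simp only [segS, if_neg hx] at hs
      refine ih (cur := cur ++ [x]) ?_ s hs
      cases cur with
      | nil => simp
      | cons c cs =>
        simp only [List.cons_append, List.drop_one, List.tail_cons] at h ⊢
        simp only [List.mem_append, List.mem_singleton, not_or]
        exact ⟨h, fun e => hx e.symm⟩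

lemma enum_filter_c (l : List String) (s : Int) :
    ((PySem.List.enumerate l s).filter (fun p => p.2 == "C")).map (fun p => p.1) =
      (cpos l).map (fun (k : Nat) => s + (k : Int)) := by
  induction l generalizing s with
  | nil => simp [PySem.List.enumerate_nil, cpos]
  | cons x xs ih =>
    rw [PySem.List.enumerate_cons]
    by_cases hx : x = "C"
    · rw [List.filter_cons_of_pos (by simp [hx]), List.map_cons, ih (s + 1)]
      simp only [cpos, if_pos hx, List.map_cons, List.map_map]
      refine List.cons_eq_cons.mpr ⟨by push_cast; ring, ?_⟩
      apply List.map_congr_left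
      intro k _
      simp only [Function.comp_apply]
      push_cast
      ring
    · rw [List.filter_cons_of_neg (by simp [hx]), ih (s + 1)]
      simp only [cpos, if_neg hx, List.map_map]
      apply List.map_congr_left
      intro k _
      simp only [Function.comp_apply]
      push_cast
      ring

lemma pyGetD_neg_one {α : Type} (xs : List α) (d : α) (h : xs ≠ []) :
    PySem.List.pyGetD xs (-1) d = xs.getLast h := by
  have hl : 0 < xs.length := List.length_pos_iff.mpr h
  simp only [PySem.List.pyGetD, PySem.List.pyGet?, PySem.List.pyIdx?]
  rw [if_neg (by omega : ¬ (0:Int) ≤ -1), if_pos (by omega : -((xs.length : Nat) : Int) ≤ -1)]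
  have h1 : ((-(-1:Int)).toNat) = 1 := rfl
  rw [h1]
  show (xs[xs.length - 1]?).getD d = xs.getLast h
  rw [List.getElem?_eq_getElem (by omega : xs.length - 1 < xs.length)]
  simp [List.getLast_eq_getElem]

lemma range_slices (l : List String) : ∀ (ks : List Nat) (k : Nat),
    (List.range ks.length).map (fun i =>
        (l.drop ((k :: ks).getD i 0)).take ((k :: ks).getD (i + 1) 0 - (k :: ks).getD i 0))
      ++ [l.drop ((k :: ks).getLast (by simp))] = bodyA l (k :: ks) := by
  intro ks
  induction ks with
  | nil => intro k; simp [bodyA]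
  | cons k2 rest ih =>
    intro k
    rw [List.length_cons, List.range_succ_eq_map, List.map_cons, List.map_map]
    have hf : ((fun i =>
        (l.drop ((k :: k2 :: rest).getD i 0)).take ((k :: k2 :: rest).getD (i + 1) 0 - (k :: k2 :: rest).getD i 0))
        ∘ Nat.succ) = (fun i =>
        (l.drop ((k2 :: rest).getD i 0)).take ((k2 :: rest).getD (i + 1) 0 - (k2 :: rest).getD i 0)) := rfl
    rw [hf]
    have hlast : (k :: k2 :: rest).getLast (by simp) = (k2 :: rest).getLast (by simp) :=
      List.getLast_cons (by simp)
    rw [List.cons_append, hlast, ih k2]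
    simp [bodyA]

lemma bodyA_segS : ∀ (n : Nat) (b u : List String), b.length ≤ n →
    bodyA (u ++ "C" :: b) (u.length :: (cpos b).map (· + (u.length + 1))) = segS ["C"] b := by
  intro n
  induction n with
  | zero =>
    intro b u hb
    have hb0 : b = [] := List.length_eq_zero_iff.mp (Nat.le_zero.mp hb)
    subst hb0
    simp [cpos, bodyA, segS]
  | succ n ih =>
    intro b u hb
    by_cases hC : "C" ∈ b
    · obtain ⟨a, b', rfl, ha⟩ := first_split hC
      rw [cpos_append b' ha]
      simp only [List.map_cons, List.map_map]
      rw [bodyA]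
      have hdrop : (u ++ "C" :: (a ++ "C" :: b')).drop u.length = "C" :: (a ++ "C" :: b') :=
        List.drop_left
      have htake : ("C" :: (a ++ "C" :: b')).take (a.length + (u.length + 1) - u.length)
          = "C" :: a := by
        have he : a.length + (u.length + 1) - u.length = a.length + 1 := by omega
        rw [he, List.take_succ_cons, List.take_left]
      rw [hdrop, htake]
      have hlb : b'.length ≤ n := by
        have := hb
        simp only [List.length_append, List.length_cons] at this
        omega
      have hih := ih b' (u ++ "C" :: a) hlb
      have hl2 : (u ++ "C" :: a) ++ "C" :: b' = u ++ "C" :: (a ++ "C" :: b') := by simp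
      rw [hl2] at hih
      have hxy : (a.length + (u.length + 1)) :: (cpos b').map
            ((fun x => x + (u.length + 1)) ∘ (fun x => x + (a.length + 1)))
          = (u ++ "C" :: a).length :: (cpos b').map (· + ((u ++ "C" :: a).length + 1)) := by
        refine List.cons_eq_cons.mpr ⟨by simp; omega, ?_⟩
        apply List.map_congr_left
        intro k _
        simp only [Function.comp_apply, List.length_append, List.length_cons]
        omega
      rw [hxy, hih, segS_split b' ["C"] ha]
      simp
    · rw [cpos_eq_nil hC]
      simp only [List.map_nil, bodyA]
      rw [List.drop_left, segS_no_C ["C"] hC (by simp)]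
      rfl

-- B's fold produces the canonical segmentation
lemma foldB (l : List String) : ∀ (acc : List (List String)) (cur : List String),
    (l.foldl stepB (acc, cur)).1 ++ [(l.foldl stepB (acc, cur)).2] = acc ++ segS cur l := by
  induction l with
  | nil => intro acc cur; simp [segS]
  | cons x xs ih =>
    intro acc cur
    rw [List.foldl_cons]
    by_cases hx : x = "C"
    · by_cases hc : cur = []
      · have hs : stepB (acc, cur) x = (acc, [x]) := by simp [stepB, hx, hc]
        rw [hs, ih, hx, hc]
        simp [segS]
      · have hs : stepB (acc, cur) x = (acc ++ [cur], [x]) := by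
          simp [stepB, hx, List.isEmpty_iff, hc]
        rw [hs, ih, hx]
        simp [segS, hc]
    · have hs : stepB (acc, cur) x = (acc, cur ++ [x]) := by simp [stepB, hx]
      rw [hs, ih]
      simp [segS, hx]

-- the windowed scan of a pattern "C"::p' over a segment whose tail has no "C" is a prefix test
lemma any_window_iff (seg p' : List String) (h : "C" ∉ seg.drop 1) :
    (((PySem.List.pyRange 0 (PySem.List.len seg - PySem.List.len ("C" :: p') + 1)).map
        (fun j => PySem.List.slice seg (some j) (some (j + PySem.List.len ("C" :: p'))) == ("C" :: p'))).any id = true)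
      ↔ seg.take (p'.length + 1) = "C" :: p' := by
  rw [List.any_map, List.any_eq_true]
  simp only [Function.comp_apply, id, PySem.List.len_eq, List.length_cons]
  constructor
  · rintro ⟨j, hj, hslice⟩
    rw [PySem.List.mem_pyRange_one] at hj
    obtain ⟨jn, rfl⟩ : ∃ jn : Nat, j = (jn : Int) := ⟨j.toNat, by omega⟩
    rw [PySem.List.slice_natCast_add, beq_iff_eq] at hslice
    rcases Nat.eq_zero_or_pos jn with h0 | h1
    · subst h0; simpa using hslice
    · exfalso
      have hm : "C" ∈ seg.drop jn := by
        have : "C" ∈ (seg.drop jn).take (p'.length + 1) := by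
          rw [hslice]; exact List.mem_cons_self
        exact List.mem_of_mem_take this
      have : seg.drop jn = (seg.drop 1).drop (jn - 1) := by
        rw [List.drop_drop]; congr 1; omega
      rw [this] at hm
      exact h (List.mem_of_mem_drop hm)
  · intro ht
    have hlen : p'.length + 1 ≤ seg.length := by
      have := congrArg List.length ht
      simp only [List.length_take, List.length_cons] at this
      omega
    refine ⟨0, ?_, ?_⟩
    · rw [PySem.List.mem_pyRange_one]
      constructor
      · omega
      · push_cast; omega
    · rw [show (0:Int) = ((0:Nat):Int) from rfl, PySem.List.slice_natCast_add]
      simp [ht]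

lemma filterMap_if_eq_filter {α : Type} (l : List α) (p : α → Bool) :
    l.filterMap (fun x => if p x then some x else none) = l.filter p := by
  induction l with
  | nil => rfl
  | cons x xs ih => by_cases h : p x <;> simp [h, ih]

lemma wflag_eq_flagB (seg : List String) (h : "C" ∉ seg.drop 1) :
    decide (wflag seg = 1) = flagB seg := by
  have ha1 := any_window_iff seg ["E", "D"] h
  rw [show (["E", "D"] : List String).length + 1 = 3 from rfl] at ha1
  have ha2 := any_window_iff seg ["D", "E", "D"] h
  rw [show (["D", "E", "D"] : List String).length + 1 = 4 from rfl] at ha2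
  have e0 : PySem.List.pyGetD ([["C","E","D"], ["C","D","E","D"]] : List (List String)) 0 ([] : List String)
      = ["C","E","D"] := rfl
  have e1 : PySem.List.pyGetD ([["C","E","D"], ["C","D","E","D"]] : List (List String)) 1 ([] : List String)
      = ["C","D","E","D"] := rfl
  simp only [wflag]
  simp only [e0, e1]
  by_cases hP1 : seg.take 3 = ["C", "E", "D"]
  · have hlen : 3 ≤ seg.length := by
      have := congrArg List.length hP1
      rw [List.length_take] at this
      simp only [List.length_cons, List.length_nil] at this
      omega
    have hA1 : (((PySem.List.pyRange 0 (PySem.List.len seg - PySem.List.len (["C","E","D"] : List String) + 1)).map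
        (fun j => PySem.List.slice seg (some j) (some (j + PySem.List.len (["C","E","D"] : List String))) ==
          (["C","E","D"] : List String))).any id) = true := ha1.mpr hP1
    simp only [hA1]
    simp [flagB, hP1]
    split_ifs <;> omega
  · have hA1 : (((PySem.List.pyRange 0 (PySem.List.len seg - PySem.List.len (["C","E","D"] : List String) + 1)).map
        (fun j => PySem.List.slice seg (some j) (some (j + PySem.List.len (["C","E","D"] : List String))) ==
          (["C","E","D"] : List String))).any id) = false := by
      rw [Bool.eq_false_iff]
      intro hcon
      exact hP1 (ha1.mp hcon)
    by_cases hP2 : seg.take 4 = ["C", "D", "E", "D"]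
    · have hlen4 : 4 ≤ seg.length := by
        have := congrArg List.length hP2
        rw [List.length_take] at this
        simp only [List.length_cons, List.length_nil] at this
        omega
      have hA2 : (((PySem.List.pyRange 0 (PySem.List.len seg - PySem.List.len (["C","D","E","D"] : List String) + 1)).map
          (fun j => PySem.List.slice seg (some j) (some (j + PySem.List.len (["C","D","E","D"] : List String))) ==
            (["C","D","E","D"] : List String))).any id) = true := ha2.mpr hP2
      simp only [hA1, hA2]
      simp [flagB, hP2]
      omega
    · have hA2 : (((PySem.List.pyRange 0 (PySem.List.len seg - PySem.List.len (["C","D","E","D"] : List String) + 1)).map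
          (fun j => PySem.List.slice seg (some j) (some (j + PySem.List.len (["C","D","E","D"] : List String))) ==
            (["C","D","E","D"] : List String))).any id) = false := by
        rw [Bool.eq_false_iff]
        intro hcon
        exact hP2 (ha2.mp hcon)
      simp only [hA1, hA2]
      simp [flagB, hP1, hP2]

lemma arrange_eq (segs : List (List String)) (hinv : ∀ s ∈ segs, "C" ∉ s.drop 1) :
    arrangeA segs = (PySem.List.enumerate segs).filterMap
      (fun p => if flagB p.2 then some p.1 else none) := by
  rw [PySem.List.enumerate_eq_map_pyRange segs [], List.filterMap_map]
  unfold arrangeA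
  rw [PySem.List.foldl_append_ite_eq_filter, List.nil_append]
  have hcong : ∀ i ∈ PySem.List.pyRange 0 (PySem.List.len segs),
      decide (wflag (PySem.List.pyGetD segs i []) = 1) = flagB (PySem.List.pyGetD segs i []) := by
    intro i hi
    rw [PySem.List.mem_pyRange_one, PySem.List.len_eq] at hi
    have hmem : PySem.List.pyGetD segs i [] ∈ segs := by
      rw [PySem.List.pyGetD_eq_getElem _ _ hi.1 (by exact_mod_cast hi.2)]
      exact List.getElem_mem _
    exact wflag_eq_flagB _ (hinv _ hmem)
  rw [List.filter_congr hcong]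
  rw [← filterMap_if_eq_filter (p := fun i => flagB (PySem.List.pyGetD segs i []))]
  rfl

lemma cindX_eq (l : List String) : cindX l = (cpos l).map (fun (k : Nat) => (k : Int)) := by
  unfold cindX
  rw [enum_filter_c l 0]
  apply List.map_congr_left
  intro k _
  simp

lemma csegsA_eq (u b : List String) (hu : "C" ∉ u) :
    csegsA (u ++ "C" :: b) ((cpos (u ++ "C" :: b)).map (fun (k : Nat) => (k : Int))) =
      segS [] (u ++ "C" :: b) := by
  have hks : cpos (u ++ "C" :: b) = u.length :: (cpos b).map (· + (u.length + 1)) :=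
    cpos_append b hu
  simp only [csegsA]
  rw [hks]
  have hget : ∀ i : Nat,
      PySem.List.pyGetD ((u.length :: (cpos b).map (· + (u.length + 1))).map (fun (k : Nat) => (k : Int))) (i : Int) 0
        = (((u.length :: (cpos b).map (· + (u.length + 1))).getD i 0 : Nat) : Int) := by
    intro i
    rw [show (0:Int) = ((0:Nat):Int) from rfl, PySem.List.pyGetD_map, PySem.List.pyGetD_natCast]
  have h0 : PySem.List.pyGetD ((u.length :: (cpos b).map (· + (u.length + 1))).map (fun (k : Nat) => (k : Int))) 0 0
      = ((u.length : Nat) : Int) := by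
    have h00 := hget 0
    simp only [Nat.cast_zero] at h00
    rw [h00]
    rfl
  rw [h0]
  rw [PySem.List.foldl_append_singleton_eq_map]
  have hlen1 : PySem.List.len ((u.length :: (cpos b).map (· + (u.length + 1))).map (fun (k : Nat) => (k : Int))) - 1
      = (((cpos b).map (· + (u.length + 1))).length : Int) := by
    rw [PySem.List.len_eq]
    simp only [List.length_map, List.length_cons]
    push_cast
    ring
  rw [hlen1, PySem.List.pyRange_zero_natCast, List.map_map]
  have hfun : ∀ i ∈ List.range ((cpos b).map (· + (u.length + 1))).length,
      ((fun i => PySem.List.slice (u ++ "C" :: b)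
          (some (PySem.List.pyGetD ((u.length :: (cpos b).map (· + (u.length + 1))).map (fun (k : Nat) => (k : Int))) i 0))
          (some (PySem.List.pyGetD ((u.length :: (cpos b).map (· + (u.length + 1))).map (fun (k : Nat) => (k : Int))) (i + 1) 0)))
        ∘ (fun (k : Nat) => (k : Int))) i
      = ((u ++ "C" :: b).drop ((u.length :: (cpos b).map (· + (u.length + 1))).getD i 0)).take
          ((u.length :: (cpos b).map (· + (u.length + 1))).getD (i + 1) 0
            - (u.length :: (cpos b).map (· + (u.length + 1))).getD i 0) := by
    intro i _
    simp only [Function.comp_apply]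
    rw [hget i, show ((i : Nat) : Int) + 1 = ((i + 1 : Nat) : Int) by push_cast; ring, hget (i + 1),
      PySem.List.slice_natCast]
  rw [List.map_congr_left hfun]
  have hne : ((u.length :: (cpos b).map (· + (u.length + 1))).map (fun (k : Nat) => (k : Int))) ≠ [] := by simp
  have hlast : PySem.List.pyGetD ((u.length :: (cpos b).map (· + (u.length + 1))).map (fun (k : Nat) => (k : Int))) (-1) 0
      = (((u.length :: (cpos b).map (· + (u.length + 1))).getLast (by simp) : Nat) : Int) := by
    rw [pyGetD_neg_one _ _ hne, List.getLast_map]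
  rw [hlast, PySem.List.slice_from_natCast, List.append_assoc,
    range_slices (u ++ "C" :: b) ((cpos b).map (· + (u.length + 1))) u.length,
    bodyA_segS b.length b u le_rfl, segS_split b [] hu]
  by_cases hu0 : u = []
  · subst hu0
    simp
  · have hne0 : ((u.length : Nat) : Int) ≠ 0 := by
      intro h'
      exact hu0 (List.length_eq_zero_iff.mp (by exact_mod_cast h'))
    rw [if_pos hne0, PySem.List.slice_to_natCast, List.take_left]
    simp [hu0]

lemma main_eq (l : List String) : find_arrange l = find_arrange_alt l := by
  by_cases hC : "C" ∈ l
  · obtain ⟨u, b, rfl, hu⟩ := first_split hC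
    have hks : cpos (u ++ "C" :: b) = u.length :: (cpos b).map (· + (u.length + 1)) :=
      cpos_append b hu
    have hlen : (cindX (u ++ "C" :: b)).length > 0 := by
      rw [cindX_eq, hks]; simp
    rw [A_unfold, B_unfold, if_pos hlen, if_pos hC]
    have hsB : segsB (u ++ "C" :: b) = segS [] (u ++ "C" :: b) := by
      unfold segsB
      rw [foldB]
      rfl
    have hsA : csegsA (u ++ "C" :: b) (cindX (u ++ "C" :: b)) = segS [] (u ++ "C" :: b) := by
      rw [cindX_eq]
      exact csegsA_eq u b hu
    rw [hsA, hsB]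
    have hinv : ∀ s ∈ segS [] (u ++ "C" :: b), "C" ∉ s.drop 1 :=
      segS_inv (by simp)
    rw [arrange_eq _ hinv]
  · have h0 : cindX l = [] := by
      rw [cindX_eq, cpos_eq_nil hC]; rfl
    rw [A_unfold, B_unfold, h0, if_neg (by simp), if_neg hC]

-- ===== VERDICT (by name: the statement is the Claim_ definition above) =====
theorem find_arrange_spec : Claim_equal_find_arrange := by
  intro tag_valid _
  unfold Spec_find_arrange
  exact main_eq tag_valid
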